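-- pv_equiv track=rewrite | github.com/NGWi/deliberate-practice2 | sorts/decHashSort.py | expandTree
-- ===== SOURCE A (Python) =====
-- def expandTree(tree: set, layers: int) -> list:
--     """
--     We expand the layers one at a time (breadth-first). The nodes are inherently ordered by 0...9.
--     """
--     parent_layer = [""]
--     for i in range(layers):
--         child_layer = []
--         for parent in parent_layer:
--             for i in range(10):
--                 child = parent + str(i)
--                 if child in tree:
--                     child_layer.append(child)
--         parent_layer = child_layer  # Can skip last one and do while True with if i < layer. See below
--
--     return parent_layer
-- ===== SOURCE B (Python) =====
-- def expandTree(tree: set, layers: int) -> list: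
--     """Depth-first expansion of the digit prefix tree, in digit order."""
--     def helper(prefix, depth):
--         if depth >= layers:
--             return [prefix]
--         out = []
--         for i in range(10):
--             child = prefix + str(i)
--             if child in tree:
--                 out.extend(helper(child, depth + 1))
--         return out
--     return helper("", 0)
-- ===== Notes on version B (the rewrite author's own statement) =====
-- stated objective: alternative
-- what changed: Replaced the layer-by-layer BFS that rebuilds a whole frontier list per layer with a depth-first recursion over the prefix tree that emits each length-`layers` string in digit order.
import Mathlib
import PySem

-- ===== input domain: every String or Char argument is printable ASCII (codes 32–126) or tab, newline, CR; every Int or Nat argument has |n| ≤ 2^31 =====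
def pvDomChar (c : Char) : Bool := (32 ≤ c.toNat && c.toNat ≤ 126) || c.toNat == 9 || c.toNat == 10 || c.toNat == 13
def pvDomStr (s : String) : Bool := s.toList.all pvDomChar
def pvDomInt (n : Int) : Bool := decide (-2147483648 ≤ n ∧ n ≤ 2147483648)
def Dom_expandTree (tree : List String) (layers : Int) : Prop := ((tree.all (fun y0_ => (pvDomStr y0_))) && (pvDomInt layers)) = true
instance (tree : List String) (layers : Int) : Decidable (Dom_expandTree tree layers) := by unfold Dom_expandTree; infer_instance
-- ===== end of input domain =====

-- B replaces the layered BFS with a depth-first recursion in digit order (alternative decomposition, same results).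

-- ===== PORT A =====
def expandTree (tree : List String) (layers : Int) : List String :=
  (PySem.List.pyRange 0 layers 1).foldl (fun parent_layer _ =>
    parent_layer.foldl (fun child_layer parent =>
      (PySem.List.pyRange 0 10 1).foldl (fun cl i =>
        let child := parent ++ PySem.Int.toStr i
        if tree.contains child then cl ++ [child] else cl) child_layer) []) [""]

-- ===== PORT B =====
-- helper(prefix, depth): recursion counted by the remaining depth (layers - depth);
-- `depth >= layers` in Python corresponds to remaining = 0 here.
def expandTreeDfs (tree : List String) (pre : String) : Nat → List String
  | 0 => [pre]
  | n+1 =>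
    (PySem.List.pyRange 0 10 1).foldl (fun out i =>
      let child := pre ++ PySem.Int.toStr i
      if tree.contains child then out ++ expandTreeDfs tree child n else out) []

def expandTree_alt (tree : List String) (layers : Int) : List String :=
  expandTreeDfs tree "" layers.toNat

-- ===== PRECONDITION & SPEC =====
def Spec_expandTree (tree : List String) (layers : Int) (out : List String) : Prop := out = expandTree_alt tree layers
instance (tree : List String) (layers : Int) (out : List String) : Decidable (Spec_expandTree tree layers out) := by unfold Spec_expandTree; infer_instance

-- ===== CLAIM (what is proved, stated in full; the proofs are below) =====
def Claim_equal_expandTree : Prop := ∀ (tree : List String) (layers : Int), Dom_expandTree tree layers → Spec_expandTree tree layers (expandTree tree layers)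

-- ===== LEMMAS AND PROOFS =====

-- the list of children of `p` present in the tree, in digit order
def pvChildren (tree : List String) (p : String) : List String :=
  ((PySem.List.pyRange 0 10 1).filter (fun i => tree.contains (p ++ PySem.Int.toStr i))).map
    (fun i => p ++ PySem.Int.toStr i)

lemma pvLayer_eq (tree : List String) (L acc : List String) :
    L.foldl (fun child_layer parent =>
      (PySem.List.pyRange 0 10 1).foldl (fun cl i =>
        let child := parent ++ PySem.Int.toStr i
        if tree.contains child then cl ++ [child] else cl) child_layer) acc
    = acc ++ L.flatMap (pvChildren tree) := by
  induction L generalizing acc with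
  | nil => simp
  | cons p L ih =>
    simp only [List.foldl_cons, List.flatMap_cons, ih]
    rw [PySem.List.foldl_append_if]
    simp [pvChildren]

lemma pvFoldl_ignore {α : Type} (f : α → α) (l : List Int) (init : α) :
    l.foldl (fun a _ => f a) init = f^[l.length] init := by
  induction l generalizing init with
  | nil => rfl
  | cons x l ih => simp [List.foldl_cons, ih, Function.iterate_succ_apply]

lemma pvFoldl_append_if_flatMap {α β : Type} (p : α → Bool) (g : α → List β)
    (l : List α) (acc : List β) :
    l.foldl (fun a x => if p x then a ++ g x else a) acc
    = acc ++ (l.filter p).flatMap g := by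
  induction l generalizing acc with
  | nil => simp
  | cons x l ih =>
    by_cases h : p x <;> simp [List.foldl_cons, h, ih]

lemma pvDfs_succ (tree : List String) (p : String) (n : Nat) :
    expandTreeDfs tree p (n+1) = (pvChildren tree p).flatMap (fun c => expandTreeDfs tree c n) := by
  show (PySem.List.pyRange 0 10 1).foldl
      (fun out i => if tree.contains (p ++ PySem.Int.toStr i)
        then out ++ expandTreeDfs tree (p ++ PySem.Int.toStr i) n else out) []
    = _
  rw [pvFoldl_append_if_flatMap]
  simp [pvChildren, List.flatMap_map]

lemma pvIterate_eq (tree : List String) (n : Nat) (L : List String) :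
    (fun M => M.flatMap (pvChildren tree))^[n] L = L.flatMap (fun p => expandTreeDfs tree p n) := by
  induction n generalizing L with
  | zero => simp [expandTreeDfs]
  | succ n ih =>
    rw [Function.iterate_succ_apply, ih]
    simp only [List.flatMap_assoc]
    refine List.flatMap_congr ?_
    intro p _
    exact (pvDfs_succ tree p n).symm

-- ===== VERDICT (by name: the statement is the Claim_ definition above) =====
theorem expandTree_spec : Claim_equal_expandTree := by
  intro tree layers _
  show expandTree tree layers = expandTree_alt tree layers
  unfold expandTree expandTree_alt
  have h : ∀ (L : List String),
      L.foldl (fun child_layer parent =>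
        (PySem.List.pyRange 0 10 1).foldl (fun cl i =>
          let child := parent ++ PySem.Int.toStr i
          if tree.contains child then cl ++ [child] else cl) child_layer) []
      = (fun M => M.flatMap (pvChildren tree)) L := by
    intro L; rw [pvLayer_eq]; simp
  calc (PySem.List.pyRange 0 layers 1).foldl (fun parent_layer _ =>
        parent_layer.foldl (fun child_layer parent =>
          (PySem.List.pyRange 0 10 1).foldl (fun cl i =>
            let child := parent ++ PySem.Int.toStr i
            if tree.contains child then cl ++ [child] else cl) child_layer) []) [""]
      = (fun M => M.flatMap (pvChildren tree))^[(PySem.List.pyRange 0 layers 1).length] [""] := by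
        rw [← pvFoldl_ignore]
        congr 1
        funext a x
        exact h a
    _ = expandTreeDfs tree "" layers.toNat := by
        rw [PySem.List.length_pyRange_one, pvIterate_eq]
        simp
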